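-- pv_equiv track=rewrite | github.com/wilmurillo-ai/Design-Assistant | .skills/openclaw-skills/skills/jisuapi/news-cn/fetch.py | _digest_markdown
-- ===== SOURCE A (Python) =====
-- from typing import Any, Dict, List, Optional, Tuple
--
-- def _digest_markdown(items: List[Dict[str, str]], headline: str, date_line: str) -> str:
--     lines = [
--         "# %s" % headline,
--         "",
--         "> 日期：%s（按来源分组；可直接发布或由上游 Agent 再摘要）" % date_line,
--         "",
--     ]
--     by_src: Dict[str, List[Dict[str, str]]] = {}
--     for it in items:
--         src = it.get("feed") or "其他"
--         by_src.setdefault(src, []).append(it)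
--     for src in sorted(by_src.keys()):
--         lines.append("## %s\n" % src)
--         for it in by_src[src][:20]:
--             t = it.get("title") or ""
--             u = it.get("link") or ""
--             if u:
--                 lines.append("- [%s](%s)" % (t, u))
--             else:
--                 lines.append("- %s" % t)
--         lines.append("")
--     lines.append("---\n*采集自上述站点列表页，详情请阅读原文。*\n")
--     return "\n".join(lines)
-- ===== SOURCE B (Python) =====
-- def _digest_markdown(items, headline, date_line):
--     def src_of(it):
--         return it.get("feed") or "其他"
--
--     def line_of(it):
--         t = it.get("title") or ""
--         u = it.get("link") or ""
--         return "- [%s](%s)" % (t, u) if u else "- %s" % t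
--
--     body = []
--     for src in sorted({src_of(it) for it in items}):
--         body.append("## %s\n" % src)
--         body.extend(line_of(it) for it in [it for it in items if src_of(it) == src][:20])
--         body.append("")
--     return "\n".join(
--         ["# %s" % headline, "",
--          "> 日期：%s（按来源分组；可直接发布或由上游 Agent 再摘要）" % date_line, ""]
--         + body
--         + ["---\n*采集自上述站点列表页，详情请阅读原文。*\n"])
-- ===== Notes on version B (the rewrite author's own statement) =====
-- stated objective: simpler
-- what changed: B drops A's dict-of-lists grouping index (setdefault/append then sorted keys): it sorts the distinct source keys once and re-filters the item list per source, building the body as one flat list.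
import Mathlib
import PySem

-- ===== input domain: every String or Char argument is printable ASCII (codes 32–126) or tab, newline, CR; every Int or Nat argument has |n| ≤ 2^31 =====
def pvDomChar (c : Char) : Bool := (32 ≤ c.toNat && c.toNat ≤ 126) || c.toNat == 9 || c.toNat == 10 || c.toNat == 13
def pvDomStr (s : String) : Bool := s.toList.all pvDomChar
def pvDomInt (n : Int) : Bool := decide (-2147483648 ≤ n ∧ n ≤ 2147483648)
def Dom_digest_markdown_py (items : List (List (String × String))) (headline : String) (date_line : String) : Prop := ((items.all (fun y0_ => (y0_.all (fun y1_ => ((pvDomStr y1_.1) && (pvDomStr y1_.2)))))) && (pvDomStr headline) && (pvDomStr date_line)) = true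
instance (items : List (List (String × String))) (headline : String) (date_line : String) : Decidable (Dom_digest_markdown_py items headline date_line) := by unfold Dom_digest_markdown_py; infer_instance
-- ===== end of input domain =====

-- B replaces A's dict-of-lists index (setdefault/append, then sorted keys) by sorting the
-- distinct source keys once and re-filtering the item list per source: simpler, no dict.


-- ===== PORT A =====
-- 'it.get(k) or fb': a missing key (None) and an empty value are both falsy, so both fall back to fb
def pvGetOrA (it : List (String × String)) (k : String) (fb : String) : String :=
  let v := ((PySem.Dict.ofList it).get? k).getD ""
  if v = "" then fb else v

def digest_markdown_py (items : List (List (String × String))) (headline : String) (date_line : String) : String :=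
  let lines0 : List String :=
    ["# " ++ headline, "",
     "> 日期：" ++ date_line ++ "（按来源分组；可直接发布或由上游 Agent 再摘要）", ""]
  -- by_src.setdefault(src, []).append(it)  =  modify src [] (· ++ [it])
  let by_src : PySem.Dict String (List (List (String × String))) :=
    items.foldl (fun d it => d.modify (pvGetOrA it "feed" "其他") [] (· ++ [it])) PySem.Dict.empty
  let lines1 :=
    (PySem.List.sorted by_src.keys (fun k => k) false).foldl
      (fun ls src =>
        -- by_src[src] never raises here since src comes from by_src.keys, so getD is exact
        (((by_src.getD src []).take 20).foldl
          (fun ls2 it =>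
            let t := pvGetOrA it "title" ""
            let u := pvGetOrA it "link" ""
            if u ≠ "" then ls2 ++ ["- [" ++ t ++ "](" ++ u ++ ")"]
            else ls2 ++ ["- " ++ t])
          (ls ++ ["## " ++ src ++ "\n"])) ++ [""])
      lines0
  PySem.Str.join "\n" (lines1 ++ ["---\n*采集自上述站点列表页，详情请阅读原文。*\n"])

-- ===== PORT B =====
def pvSrcB (it : List (String × String)) : String :=
  let v := ((PySem.Dict.ofList it).get? "feed").getD ""
  if v = "" then "其他" else v

def pvLineB (it : List (String × String)) : String :=
  let t := ((PySem.Dict.ofList it).get? "title").getD ""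
  let u := ((PySem.Dict.ofList it).get? "link").getD ""
  if u ≠ "" then "- [" ++ t ++ "](" ++ u ++ ")" else "- " ++ t

def digest_markdown_py_alt (items : List (List (String × String))) (headline : String) (date_line : String) : String :=
  let body : List String :=
    (PySem.List.sorted (PySem.Set.ofList (items.map pvSrcB)) (fun k => k) false).flatMap
      (fun src =>
        ("## " ++ src ++ "\n")
          :: ((items.filter (fun it => pvSrcB it == src)).take 20).map pvLineB ++ [""])
  PySem.Str.join "\n"
    (["# " ++ headline, "",
      "> 日期：" ++ date_line ++ "（按来源分组；可直接发布或由上游 Agent 再摘要）", ""]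
      ++ body ++ ["---\n*采集自上述站点列表页，详情请阅读原文。*\n"])

-- ===== PRECONDITION & SPEC =====
def Spec_digest_markdown_py (items : List (List (String × String))) (headline : String) (date_line : String) (out : String) : Prop := out = digest_markdown_py_alt items headline date_line
instance (items : List (List (String × String))) (headline : String) (date_line : String) (out : String) : Decidable (Spec_digest_markdown_py items headline date_line out) := by unfold Spec_digest_markdown_py; infer_instance

-- ===== CLAIM (what is proved, stated in full; the proofs are below) =====
def Claim_equal_digest_markdown_py : Prop := ∀ (items : List (List (String × String))) (headline : String) (date_line : String), Dom_digest_markdown_py items headline date_line → Spec_digest_markdown_py items headline date_line (digest_markdown_py items headline date_line)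

-- ===== LEMMAS AND PROOFS =====

theorem pvSrcA_eq_srcB (it : List (String × String)) : pvGetOrA it "feed" "其他" = pvSrcB it := rfl

theorem pvGetOrA_empty (it : List (String × String)) (k : String) :
    pvGetOrA it k "" = ((PySem.Dict.ofList it).get? k).getD "" := by
  simp only [pvGetOrA]
  split_ifs with h
  · exact h.symm
  · rfl

-- A's grouping dict: its lookup at any key is the filter of items with that source
theorem pvGetD_by_src (items : List (List (String × String))) (src : String) :
    (items.foldl (fun d it => d.modify (pvGetOrA it "feed" "其他") [] (· ++ [it]))
        (PySem.Dict.empty : PySem.Dict String (List (List (String × String))))).getD src []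
      = items.filter (fun it => pvSrcB it == src) := by
  have h : items.foldl (fun d it => d.modify (pvGetOrA it "feed" "其他") [] (· ++ [it]))
        (PySem.Dict.empty : PySem.Dict String (List (List (String × String))))
      = (items.map (fun it => (pvSrcB it, it))).foldl
          (fun d p => d.modify p.1 [] (· ++ [p.2])) PySem.Dict.empty := by
    rw [List.foldl_map]
    rfl
  rw [h, PySem.Dict.getD_foldl_modify_append, List.filter_map]
  simp [Function.comp_def]

-- A's grouping dict: its keys are the distinct sources in first-occurrence order
theorem pvKeys_by_src (items : List (List (String × String))) :
    (items.foldl (fun d it => d.modify (pvGetOrA it "feed" "其他") [] (· ++ [it]))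
        (PySem.Dict.empty : PySem.Dict String (List (List (String × String))))).keys
      = PySem.Set.ofList (items.map pvSrcB) := by
  rw [PySem.Dict.keys_foldl_modify_key]
  rw [show (PySem.Dict.empty : PySem.Dict String (List (List (String × String)))).keys = [] from rfl]
  rw [PySem.Set.update_nil_left]
  simp only [pvSrcA_eq_srcB]

-- A's inner line-building step appends exactly B's per-item line
theorem pvInnerStep_eq :
    (fun (ls2 : List String) (it : List (String × String)) =>
      let t := pvGetOrA it "title" ""
      let u := pvGetOrA it "link" ""
      if u ≠ "" then ls2 ++ ["- [" ++ t ++ "](" ++ u ++ ")"]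
      else ls2 ++ ["- " ++ t])
    = fun ls2 it => ls2 ++ [pvLineB it] := by
  funext ls2 it
  simp only [pvGetOrA_empty, pvLineB]
  split_ifs <;> rfl

-- A's outer per-source loop is B's flatMap over the same source list
theorem pvOuter (items : List (List (String × String))) (L : List String) (acc : List String) :
    L.foldl
      (fun ls src =>
        (((items.filter (fun it => pvSrcB it == src)).take 20).foldl
          (fun ls2 it =>
            let t := pvGetOrA it "title" ""
            let u := pvGetOrA it "link" ""
            if u ≠ "" then ls2 ++ ["- [" ++ t ++ "](" ++ u ++ ")"]
            else ls2 ++ ["- " ++ t])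
          (ls ++ ["## " ++ src ++ "\n"])) ++ [""]) acc
    = acc ++ L.flatMap
        (fun src => ("## " ++ src ++ "\n")
          :: ((items.filter (fun it => pvSrcB it == src)).take 20).map pvLineB ++ [""]) := by
  rw [← PySem.List.foldl_append_eq_flatMap]
  apply PySem.List.foldl_congr_mem
  intro ls src _
  rw [pvInnerStep_eq, PySem.List.foldl_append_singleton_eq_map]
  simp

theorem digest_eq (items : List (List (String × String))) (headline date_line : String) :
    digest_markdown_py items headline date_line = digest_markdown_py_alt items headline date_line := by
  unfold digest_markdown_py digest_markdown_py_alt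
  simp only [pvKeys_by_src, pvGetD_by_src]
  rw [pvOuter]

-- ===== VERDICT (by name: the statement is the Claim_ definition above) =====
theorem digest_markdown_py_spec : Claim_equal_digest_markdown_py := by
  intro items headline date_line _
  unfold Spec_digest_markdown_py
  exact digest_eq items headline date_line
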